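-- pv_equiv track=rewrite | github.com/Melve25/CodeWars_Trainy | snail.py | circle
-- ===== SOURCE A (Python) =====
-- def circle(index: int, snail_map: list[list[int]]):
-- 	# NOTE: RIGHT
-- 	resp = snail_map[index : index+1][0][index : int(len(snail_map)-index)]
--
-- 	# NOTE: DOWN
-- 	for s in snail_map[index+1 : int(len(snail_map)-index)]:
-- 		resp.append(s[len(snail_map)-1-index])
--
-- 	# NOTE: LEFT
-- 	for s in list(
-- 		reversed(
-- 			snail_map[int(len(snail_map)-(index+1))][index : -(index+1)]
-- 		)
-- 	):
-- 		resp.append(s)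
--
-- 	# NOTE: UP
-- 	for s in list(
-- 		reversed(
-- 			snail_map[index + 1: -index-1]
-- 		)
-- 	):
-- 		resp.append(s[index])
--
-- 	return resp
-- ===== SOURCE B (Python) =====
-- def circle(index: int, snail_map: list[list[int]]):
-- 	# perimeter walk with a rotating direction vector instead of four slice passes
-- 	n = len(snail_map)
-- 	if index < 0 or index >= n:
-- 		raise IndexError('ring index out of range')
-- 	lo, hi = index, n - 1 - index
-- 	if lo > hi:
-- 		return []
-- 	if lo == hi:
-- 		return [snail_map[lo][lo]]
-- 	resp = []
-- 	r, c = lo, lo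
-- 	dr, dc = 0, 1
-- 	for _ in range(4 * (hi - lo)):
-- 		resp.append(snail_map[r][c])
-- 		if not (lo <= r + dr <= hi and lo <= c + dc <= hi):
-- 			dr, dc = dc, -dr  # turn clockwise
-- 		r += dr
-- 		c += dc
-- 	return resp
-- ===== Notes on version B (the rewrite author's own statement) =====
-- stated objective: alternative
-- what changed: Replaced A's four separate slice/reversed passes by a single clockwise perimeter walk with a rotating direction vector; Pre_ excludes non-square matrices, on which A's mix of len(snail_map) bounds and silent slice truncation yields accidental values (duplicated or dropped cells) when it does not raise.
-- outside the precondition, e.g. on circle(0, [[1, 2, 3], [4, 5, 6]]): A returns [1, 2, 5, 5, 4], B returns [1, 2, 5, 4]; on circle(1, [[1, 2, 3], [4, 5, 6, 7], [8, 9, 10]]): A returns [5, 5], B returns [5]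
import Mathlib
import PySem

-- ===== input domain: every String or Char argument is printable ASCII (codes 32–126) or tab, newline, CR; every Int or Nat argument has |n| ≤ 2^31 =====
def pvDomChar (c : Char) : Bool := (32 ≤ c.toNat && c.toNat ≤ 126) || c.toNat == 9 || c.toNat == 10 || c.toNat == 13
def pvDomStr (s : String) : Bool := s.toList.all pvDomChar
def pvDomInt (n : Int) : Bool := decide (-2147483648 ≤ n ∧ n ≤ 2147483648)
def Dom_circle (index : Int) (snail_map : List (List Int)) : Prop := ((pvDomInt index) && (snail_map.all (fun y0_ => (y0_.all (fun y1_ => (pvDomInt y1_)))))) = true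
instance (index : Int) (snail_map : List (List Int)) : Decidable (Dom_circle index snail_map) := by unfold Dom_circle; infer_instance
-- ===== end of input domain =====

-- B replaces A's four slice/reversed passes by one clockwise perimeter walk (alternative decomposition, same cost).


-- ===== PORT A =====
-- literal transliteration of Source A: RIGHT slice, DOWN loop, LEFT reversed slice, UP reversed slice.
def circle (index : Int) (snail_map : List (List Int)) : List Int :=
  let N : Int := (snail_map.length : Int)
  -- RIGHT: snail_map[index:index+1][0][index : len-index]
  let resp := PySem.List.slice
      (PySem.List.pyGetD (PySem.List.slice snail_map (some index) (some (index + 1))) 0 [])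
      (some index) (some (N - index))
  -- DOWN
  let resp := (PySem.List.slice snail_map (some (index + 1)) (some (N - index))).foldl
      (fun acc s => acc ++ [PySem.List.pyGetD s (N - 1 - index) 0]) resp
  -- LEFT
  let resp := ((PySem.List.slice (PySem.List.pyGetD snail_map (N - (index + 1)) [])
        (some index) (some (-(index + 1)))).reverse).foldl
      (fun acc s => acc ++ [s]) resp
  -- UP
  let resp := ((PySem.List.slice snail_map (some (index + 1)) (some (-index - 1))).reverse).foldl
      (fun acc s => acc ++ [PySem.List.pyGetD s index 0]) resp
  resp

-- ===== PORT B =====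
-- the walk of Source B: emit current cell, turn clockwise when the next step would leave the ring, step.
def circleWalk (snail_map : List (List Int)) (lo hi : Int) :
    Nat → Int → Int → Int → Int → List Int
  | 0, _, _, _, _ => []
  | k + 1, r, c, dr, dc =>
    let x := PySem.List.pyGetD (PySem.List.pyGetD snail_map r []) c 0
    let d' := if ¬(lo ≤ r + dr ∧ r + dr ≤ hi ∧ lo ≤ c + dc ∧ c + dc ≤ hi)
              then (dc, -dr) else (dr, dc)
    x :: circleWalk snail_map lo hi k (r + d'.1) (c + d'.2) d'.1 d'.2

def circle_alt (index : Int) (snail_map : List (List Int)) : List Int :=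
  let n : Int := (snail_map.length : Int)
  -- Source B raises IndexError on this branch; the value here is never claimed (outside Pre_)
  if index < 0 ∨ n ≤ index then []
  else
  let lo := index
  let hi := n - 1 - index
  if lo > hi then []
  else if lo = hi then [PySem.List.pyGetD (PySem.List.pyGetD snail_map lo []) lo 0]
  else circleWalk snail_map lo hi (4 * (hi - lo)).toNat lo lo 0 1

-- ===== PRECONDITION & SPEC =====
-- Pre_ excludes index < 0 and index >= len(snail_map), where A raises IndexError, and ragged
-- matrices on which a row the ring touches is shorter or longer than len(snail_map) requires:
-- there A either raises IndexError or returns an accidental value produced by silent slice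
-- truncation (duplicated or dropped cells); rows the ring never touches are unconstrained.
def Pre_circle (index : Int) (snail_map : List (List Int)) : Prop :=
  0 ≤ index ∧ index < (snail_map.length : Int) ∧
  (2 * index.toNat + 2 ≤ snail_map.length →
      snail_map.length - index.toNat ≤ (snail_map.getD index.toNat []).length ∧
      (snail_map.getD (snail_map.length - 1 - index.toNat) []).length = snail_map.length ∧
      (∀ r ∈ List.range' (index.toNat + 1) (snail_map.length - 2 - 2 * index.toNat),
        snail_map.length - index.toNat ≤ (snail_map.getD r []).length)) ∧
  (snail_map.length = 2 * index.toNat + 1 →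
      index.toNat + 1 ≤ (snail_map.getD index.toNat []).length ∧
      (snail_map.getD index.toNat []).length ≤ snail_map.length) ∧
  (snail_map.length ≤ 2 * index.toNat →
      (snail_map.getD (snail_map.length - 1 - index.toNat) []).length ≤ 2 * index.toNat + 1)

instance (index : Int) (snail_map : List (List Int)) : Decidable (Pre_circle index snail_map) := by
  unfold Pre_circle; infer_instance

def pvWitness_circle : Int × List (List Int) := (0, [[1, 2, 3], [4, 5, 6], [7, 8, 9]])

def Spec_circle (index : Int) (snail_map : List (List Int)) (out : List Int) : Prop := out = circle_alt index snail_map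
instance (index : Int) (snail_map : List (List Int)) (out : List Int) : Decidable (Spec_circle index snail_map out) := by unfold Spec_circle; infer_instance

-- ===== CLAIM (what is proved, stated in full; the proofs are below) =====
def Claim_equal_circle : Prop := ∀ (index : Int) (snail_map : List (List Int)), Dom_circle index snail_map → Pre_circle index snail_map → Spec_circle index snail_map (circle index snail_map)

-- ===== LEMMAS AND PROOFS =====

-- the single cell value at row r, column c (0 default, as in both ports)
def cellG (snail_map : List (List Int)) (r c : Nat) : Int :=
  (snail_map.getD r []).getD c 0

theorem walk_right (snail_map : List (List Int)) (lo hi : Nat) (hlh : lo < hi)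
    (k f : Nat) (c : Nat) (hc : c + k = hi) (hlc : lo ≤ c) :
    circleWalk snail_map lo hi (k + 1 + f) lo c 0 1 =
      (List.range' c (k + 1)).map (fun j => cellG snail_map lo j) ++
      circleWalk snail_map lo hi f (lo + 1) hi 1 0 := by
  induction k generalizing c with
  | zero =>
    have hc' : c = hi := by omega
    subst hc'
    rw [show 0 + 1 + f = f + 1 by omega, circleWalk]
    rw [if_pos (by omega)]
    simp [cellG, List.range'_succ, PySem.List.pyGetD_natCast]
  | succ k ih =>
    rw [show k + 1 + 1 + f = (k + 1 + f) + 1 by omega, circleWalk]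
    rw [if_neg (by omega)]
    have : ((c:Int) + 1) = ((c+1 : Nat) : Int) := by omega
    simp only [this, add_zero]
    rw [ih (c+1) (by omega) (by omega)]
    simp [cellG, List.range'_succ, PySem.List.pyGetD_natCast]

theorem walk_down (snail_map : List (List Int)) (lo hi : Nat) (hlh : lo < hi)
    (k f : Nat) (r : Nat) (hr : r + k = hi) (hlr : lo < r) :
    circleWalk snail_map lo hi (k + 1 + f) r hi 1 0 =
      (List.range' r (k + 1)).map (fun j => cellG snail_map j hi) ++
      circleWalk snail_map lo hi f hi ((hi : Int) - 1) 0 (-1) := by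
  induction k generalizing r with
  | zero =>
    simp only [show r = hi from by omega]
    rw [show 0 + 1 + f = f + 1 by omega, circleWalk]
    rw [if_pos (by omega)]
    have h1 : ((hi:Int) + -1) = (hi:Int) - 1 := by ring
    simp [cellG, List.range'_succ, h1]
  | succ k ih =>
    rw [show k + 1 + 1 + f = (k + 1 + f) + 1 by omega, circleWalk]
    rw [if_neg (by omega)]
    have : ((r:Int) + 1) = ((r+1 : Nat) : Int) := by push_cast; ring
    simp only [this, add_zero]
    rw [ih (r+1) (by omega) (by omega)]
    simp [cellG, List.range'_succ]

theorem walk_left (snail_map : List (List Int)) (lo hi : Nat) (hlh : lo < hi)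
    (k f : Nat) (c : Nat) (hc : lo + k = c) (hch : c < hi) :
    circleWalk snail_map lo hi (k + 1 + f) hi c 0 (-1) =
      ((List.range' lo (k + 1)).map (fun j => cellG snail_map hi j)).reverse ++
      circleWalk snail_map lo hi f ((hi : Int) - 1) lo (-1) 0 := by
  induction k generalizing c with
  | zero =>
    have hc' : c = lo := by omega
    subst hc'
    rw [show 0 + 1 + f = f + 1 by omega, circleWalk]
    rw [if_pos (by omega)]
    have h1 : ((hi:Int) + -1) = (hi:Int) - 1 := by ring
    simp [cellG, List.range'_succ, h1]
  | succ k ih =>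
    rw [show k + 1 + 1 + f = (k + 1 + f) + 1 by omega, circleWalk]
    rw [if_neg (by omega)]
    have h1 : ((c:Int) + -1) = ((c - 1 : Nat) : Int) := by omega
    simp only [h1, add_zero]
    rw [ih (c-1) (by omega) (by omega)]
    rw [show List.range' lo (k + 1 + 1) = List.range' lo (k + 1) ++ [lo + 1 * (k + 1)] from List.range'_concat]
    rw [List.map_append, List.reverse_append]
    simp [cellG, show lo + (k + 1) = c by omega]

theorem walk_up (snail_map : List (List Int)) (lo hi : Nat) (hlh : lo < hi)
    (k : Nat) (r : Nat) (hr : lo + 1 + k = r) (hrh : r < hi) :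
    circleWalk snail_map lo hi (k + 1) r lo (-1) 0 =
      ((List.range' (lo + 1) (k + 1)).map (fun j => cellG snail_map j lo)).reverse := by
  induction k generalizing r with
  | zero =>
    rw [circleWalk]
    simp [circleWalk, cellG, List.range'_succ, show lo + 1 + 0 = r from hr]
  | succ k ih =>
    rw [circleWalk]
    rw [if_neg (by omega)]
    have h1 : ((r:Int) + -1) = ((r - 1 : Nat) : Int) := by omega
    simp only [h1, add_zero]
    rw [ih (r-1) (by omega) (by omega)]
    rw [show List.range' (lo+1) (k + 1 + 1) = List.range' (lo+1) (k + 1) ++ [lo + 1 + 1 * (k + 1)] from List.range'_concat]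
    rw [List.map_append, List.reverse_append]
    simp [cellG, show lo + 1 + (k + 1) = r by omega]

theorem dropTake_eq_map_range' {α : Type} [Inhabited α] (xs : List α) (a m : Nat)
    (h : a + m ≤ xs.length) :
    (xs.drop a).take m = (List.range' a m).map (fun j => xs.getD j default) := by
  apply List.ext_getElem
  · simp; omega
  · intro i h1 h2
    have hi : i < m := by simp at h1; omega
    simp [List.getElem_take, List.getElem_drop, List.getD_eq_getElem?_getD,
      List.getElem?_eq_getElem (show a + i < xs.length by omega)]

theorem slice_nat_neg {α : Type} (xs : List α) (a k : Nat) (hk : 0 < k) (ha : a ≤ xs.length) :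
    PySem.List.slice xs (some (a : Int)) (some (-(k : Int))) =
      (xs.drop a).take (xs.length - k - a) := by
  simp [PySem.List.slice, PySem.List.clampIdx]
  rw [if_pos hk, if_neg (by omega : ¬ (a:Int) < 0)]
  rcases Nat.lt_or_ge xs.length k with h | h
  · rw [if_pos h]
    have h0 : xs.length - k - a = 0 := by omega
    simp [h0, Nat.min_eq_left ha]
  · rw [if_neg (show ¬ xs.length < k by omega), Nat.min_eq_left ha]
    congr 1
    omega

theorem alt_ring (M : List (List Int)) (i d : Nat) (hd : 1 ≤ d)
    (hn : M.length = 2 * i + d + 1) :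
    circle_alt ↑i M =
      (List.range' i (d + 1)).map (fun j => cellG M i j) ++
      ((List.range' (i + 1) d).map (fun j => cellG M j (i + d)) ++
      (((List.range' i d).map (fun j => cellG M (i + d) j)).reverse ++
      ((List.range' (i + 1) (d - 1)).map (fun j => cellG M j i)).reverse)) := by
  have hcast : ((M.length : Int) - 1 - ↑i) = ((i + d : Nat) : Int) := by
    rw [hn]; push_cast; ring
  rw [circle_alt]
  simp only [hcast]
  rw [if_neg (by omega), if_neg (by push_cast; omega), if_neg (by push_cast; omega)]
  have hfuel : ((4 : Int) * (↑(i + d) - ↑i)).toNat = d + 1 + (3 * d - 1) := by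
    push_cast; omega
  rw [hfuel]
  rw [walk_right M i (i+d) (by omega) d (3*d-1) i (by omega) (by omega)]
  rw [show 3 * d - 1 = (d - 1) + 1 + (2 * d - 1) by omega]
  rw [show ((i:Int) + 1) = ((i + 1 : Nat) : Int) by push_cast; ring]
  rw [walk_down M i (i+d) (by omega) (d-1) (2*d-1) (i+1) (by omega) (by omega)]
  rw [show (((i + d : Nat) : Int)) - 1 = ((i + d - 1 : Nat) : Int) by omega]
  rw [show 2 * d - 1 = (d - 1) + 1 + (d - 1) by omega]
  rw [walk_left M i (i+d) (by omega) (d-1) (d-1) (i+d-1) (by omega) (by omega)]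
  have hup : circleWalk M ↑i ↑(i+d) (d-1) (↑(i+d) - 1) ↑i (-1) 0 =
      ((List.range' (i + 1) (d - 1)).map (fun j => cellG M j i)).reverse := by
    rcases Nat.lt_or_ge d 2 with h2 | h2
    · have : d = 1 := by omega
      subst this
      simp [circleWalk]
    · rw [show ((i + d : Nat) : Int) - 1 = ((i + d - 1 : Nat) : Int) by omega]
      rw [show d - 1 = (d - 2) + 1 by omega]
      rw [walk_up M i (i+d) (by omega) (d-2) (i+d-1) (by omega) (by omega)]
  rw [hup]
  simp [show d - 1 + 1 = d by omega]

theorem a_ring (M : List (List Int)) (i : Nat) (hbig : 2 * i + 1 < M.length)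
    (h1 : M.length - i ≤ (M.getD i []).length)
    (h2 : (M.getD (M.length - 1 - i) []).length = M.length) :
    circle ↑i M =
      (List.range' i (M.length - 2 * i)).map (fun j => cellG M i j) ++
      ((List.range' (i + 1) (M.length - i - (i + 1))).map (fun j => cellG M j (M.length - 1 - i)) ++
      (((List.range' i (M.length - (i + 1) - i)).map (fun j => cellG M (M.length - 1 - i) j)).reverse ++
      ((List.range' (i + 1) (M.length - (i + 1) - (i + 1))).map (fun j => cellG M j i)).reverse)) := by
  rw [circle]
  have c1 : ((i:Int) + 1) = ((i+1:Nat):Int) := by push_cast; ring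
  have c2 : ((M.length:Int) - ↑i) = ((M.length - i : Nat):Int) := by omega
  have c3 : ((M.length:Int) - 1 - ↑i) = ((M.length - 1 - i : Nat):Int) := by omega
  have c4 : ((M.length:Int) - (↑i + 1)) = ((M.length - 1 - i : Nat):Int) := by omega
  have c6 : (-(i:Int) - 1) = (-((i+1:Nat):Int)) := by push_cast; ring
  simp only [c1, c2, c3, c6]
  have c4' : ((M.length:Int) - ((i+1:Nat):Int)) = ((M.length - 1 - i : Nat):Int) := by push_cast; omega
  simp only [c4']
  simp only [PySem.List.slice_natCast, PySem.List.pyGetD_natCast]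
  have hB : (M.getD (M.length - 1 - i) []).length = M.length := h2
  rw [slice_nat_neg _ _ _ (by omega) (by rw [hB]; omega : i ≤ (M.getD (M.length - 1 - i) []).length)]
  rw [slice_nat_neg _ _ _ (by omega) (by omega : i + 1 ≤ M.length)]
  simp only [hB]
  -- first cell row: snail_map[index:index+1][0]
  rw [show i + 1 - i = 1 by omega, dropTake_eq_map_range' M i 1 (by omega)]
  simp only [List.range'_one, List.map_cons, List.map_nil, PySem.List.pyGetD_zero_cons]
  -- row i itself
  have hA : M.length - i ≤ (M.getD i (default : List Int)).length := h1
  rw [show M.length - i - i = M.length - 2 * i by omega]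
  rw [dropTake_eq_map_range' (M.getD i (default : List Int)) i (M.length - 2*i) (by omega)]
  -- the three foldl loops
  rw [PySem.List.foldl_append_singleton_eq_map, PySem.List.foldl_append_singleton,
    PySem.List.foldl_append_singleton_eq_map]
  -- DOWN rows
  rw [dropTake_eq_map_range' M (i+1) (M.length - i - (i+1)) (by omega)]
  -- LEFT row
  rw [dropTake_eq_map_range' (M.getD (M.length - 1 - i) []) i (M.length - (i+1) - i) (by rw [hB]; omega)]
  -- UP rows
  rw [dropTake_eq_map_range' M (i+1) (M.length - (i+1) - (i+1)) (by omega)]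
  simp only [List.map_map, List.map_reverse, Function.comp_def,
    show (default : List Int) = [] from rfl]
  simp [cellG]

theorem slice_neg_empty {α : Type} (xs : List α) (a k : Nat) (hk : 0 < k)
    (h : xs.length ≤ a + k) :
    PySem.List.slice xs (some (a : Int)) (some (-(k : Int))) = [] := by
  apply List.eq_nil_of_length_eq_zero
  simp [PySem.List.slice, PySem.List.clampIdx]
  split_ifs <;> omega

-- A on the centre ring of an odd-sized matrix: the single cell
theorem a_center (M : List (List Int)) (i : Nat) (hn : M.length = 2 * i + 1)
    (hlen1 : i + 1 ≤ (M.getD i []).length) (hlen2 : (M.getD i []).length ≤ M.length) :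
    circle ↑i M = [(M.getD i []).getD i 0] := by
  rw [circle]
  have c1 : ((i:Int) + 1) = ((i+1:Nat):Int) := by push_cast; ring
  have c2 : ((M.length:Int) - ↑i) = ((M.length - i : Nat):Int) := by omega
  have c3 : ((M.length:Int) - 1 - ↑i) = ((M.length - 1 - i : Nat):Int) := by omega
  have c6 : (-(i:Int) - 1) = (-((i+1:Nat):Int)) := by push_cast; ring
  simp only [c1, c2, c3, c6]
  have c4' : ((M.length:Int) - ((i+1:Nat):Int)) = ((M.length - 1 - i : Nat):Int) := by push_cast; omega
  simp only [c4']
  simp only [PySem.List.slice_natCast, PySem.List.pyGetD_natCast]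
  rw [show M.length - 1 - i = i by omega]
  rw [slice_neg_empty (M.getD i []) i (i+1) (by omega) (by omega)]
  rw [slice_neg_empty M (i+1) (i+1) (by omega) (by omega)]
  rw [show i + 1 - i = 1 by omega, dropTake_eq_map_range' M i 1 (by omega)]
  simp only [List.range'_one, List.map_cons, List.map_nil, PySem.List.pyGetD_zero_cons]
  rw [show M.length - i - i = 1 by omega]
  rw [dropTake_eq_map_range' (M.getD i (default : List Int)) i 1 (by
    simpa [show (default : List Int) = [] from rfl] using hlen1)]
  rw [show M.length - i - (i + 1) = 0 by omega]
  simp [show (default : List Int) = [] from rfl]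

-- A on an empty ring: every side is an empty slice
theorem a_empty (M : List (List Int)) (i : Nat) (hin : i < M.length)
    (hn : M.length ≤ 2 * i)
    (hshort : (M.getD (M.length - 1 - i) []).length ≤ 2 * i + 1) :
    circle ↑i M = [] := by
  rw [circle]
  have c1 : ((i:Int) + 1) = ((i+1:Nat):Int) := by push_cast; ring
  have c2 : ((M.length:Int) - ↑i) = ((M.length - i : Nat):Int) := by omega
  have c3 : ((M.length:Int) - 1 - ↑i) = ((M.length - 1 - i : Nat):Int) := by omega
  have c6 : (-(i:Int) - 1) = (-((i+1:Nat):Int)) := by push_cast; ring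
  simp only [c1, c2, c3, c6]
  have c4' : ((M.length:Int) - ((i+1:Nat):Int)) = ((M.length - 1 - i : Nat):Int) := by push_cast; omega
  simp only [c4']
  simp only [PySem.List.slice_natCast, PySem.List.pyGetD_natCast]
  rw [slice_neg_empty (M.getD (M.length - 1 - i) []) i (i+1) (by omega) (by omega)]
  rw [slice_neg_empty M (i+1) (i+1) (by omega) (by omega)]
  rw [show M.length - i - i = 0 by omega, show M.length - i - (i + 1) = 0 by omega]
  simp

theorem circle_eq_alt (index : Int) (M : List (List Int)) (hpre : Pre_circle index M) :
    circle index M = circle_alt index M := by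
  obtain ⟨h0, hlt, hring, hcent, hemp⟩ := hpre
  obtain ⟨i, rfl⟩ : ∃ i : Nat, index = ↑i := ⟨index.toNat, by omega⟩
  simp only [Int.toNat_natCast] at hring hcent hemp
  have hin : i < M.length := by exact_mod_cast hlt
  rcases Nat.lt_or_ge (2 * i + 1) M.length with hbig | hsmall
  · -- a proper ring with at least two cells per side
    obtain ⟨hr1, hr2, _⟩ := hring (by omega)
    rw [a_ring M i hbig hr1 hr2]
    rw [alt_ring M i (M.length - 1 - 2 * i) (by omega) (by omega)]
    simp only [show M.length - 2 * i = (M.length - 1 - 2 * i) + 1 by omega,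
      show M.length - i - (i + 1) = M.length - 1 - 2 * i by omega,
      show M.length - (i + 1) - i = M.length - 1 - 2 * i by omega,
      show M.length - (i + 1) - (i + 1) = M.length - 1 - 2 * i - 1 by omega,
      show i + (M.length - 1 - 2 * i) = M.length - 1 - i by omega]
  · rcases Nat.lt_or_ge (2 * i) M.length with heq | hlo
    · -- the centre cell: M.length = 2*i+1
      obtain ⟨hc1, hc2⟩ := hcent (by omega)
      rw [a_center M i (by omega) hc1 hc2]
      rw [circle_alt]
      rw [if_neg (by omega), if_neg (by omega), if_pos (by omega)]
      simp [PySem.List.pyGetD_natCast]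
    · -- empty ring: M.length ≤ 2*i
      rw [a_empty M i hin hlo (hemp hlo)]
      rw [circle_alt]
      rw [if_neg (by omega), if_pos (by omega)]

-- ===== VERDICT (by name: the statement is the Claim_ definition above) =====
theorem circle_spec : Claim_equal_circle := by
  intro index snail_map _ hpre
  show circle index snail_map = circle_alt index snail_map
  exact circle_eq_alt index snail_map hpre
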